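-- pv_equiv track=rewrite | github.com/DayStayyy/DialogueVallHallA | DialogueGenerator/utils.py | splitterCommaNotInQuote
-- ===== SOURCE A (Python) =====
-- def splitterCommaNotInQuote(text):
--     """Split a string by comma, but not if the comma is in quotes. Return a list of strings."""
--     result = []
--     quote = False
--     lastAppend = 0
--     for i in range(len(text)):
--         if text[i] == '"':
--             quote = not quote
--         elif text[i] == ',' and not quote:
--             result.append(text[lastAppend:i])
--             lastAppend = i + 1
--     result.append(text[lastAppend:])
--     return result
-- ===== SOURCE B (Python) =====
-- def splitterCommaNotInQuote(text):
--     """Split a string by comma, but not if the comma is in quotes. Return a list of strings."""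
--     result = []
--     current = []
--     quote = False
--     for ch in text:
--         if ch == '"':
--             quote = not quote
--             current.append(ch)
--         elif ch == ',' and not quote:
--             result.append(''.join(current))
--             current = []
--         else:
--             current.append(ch)
--     result.append(''.join(current))
--     return result
-- ===== Notes on version B (the rewrite author's own statement) =====
-- stated objective: alternative
-- what changed: Replaces the index loop that remembers a lastAppend position and slices text[lastAppend:i] with a single character-accumulator scan that builds each field in a buffer and emits it at every unquoted comma.
import Mathlib
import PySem

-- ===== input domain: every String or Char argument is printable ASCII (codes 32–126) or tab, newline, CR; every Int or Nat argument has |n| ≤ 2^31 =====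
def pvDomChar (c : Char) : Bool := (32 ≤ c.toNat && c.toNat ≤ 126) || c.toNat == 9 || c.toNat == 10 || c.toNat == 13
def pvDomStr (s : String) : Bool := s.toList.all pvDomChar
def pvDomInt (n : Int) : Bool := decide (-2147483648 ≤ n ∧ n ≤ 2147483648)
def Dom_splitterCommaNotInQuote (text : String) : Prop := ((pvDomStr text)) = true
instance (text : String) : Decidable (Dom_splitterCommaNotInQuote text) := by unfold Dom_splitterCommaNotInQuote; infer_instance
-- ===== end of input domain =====

-- B replaces A's lastAppend-index-and-slice loop by a character-accumulator scan (alternative decomposition, same cost).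

-- ===== PORT A =====
-- step of A's 'for i in range(len(text))' loop; state = (result, quote, lastAppend)
def splitAStep (cs : List Char) (st : List String × Bool × Int) (i : Int) : List String × Bool × Int :=
  match PySem.List.pyGet? cs i with
  | some c =>
    if c = '"' then (st.1, !st.2.1, st.2.2)
    else if c = ',' ∧ st.2.1 = false then
      (st.1 ++ [String.mk (PySem.List.slice cs (some st.2.2) (some i))], st.2.1, i + 1)
    else (st.1, st.2.1, st.2.2)
  | none => (st.1, st.2.1, st.2.2)  -- unreachable: i ∈ range(len(text))

def splitterCommaNotInQuote (text : String) : List String :=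
  let cs := text.toList
  let st := (PySem.List.pyRange 0 (cs.length : Int) 1).foldl (splitAStep cs) ([], false, 0)
  st.1 ++ [String.mk (PySem.List.slice cs (some st.2.2) none)]

-- ===== PORT B =====
-- step of B's 'for ch in text' loop; state = (result, quote, current buffer)
def splitBStep (st : List String × Bool × List Char) (c : Char) : List String × Bool × List Char :=
  if c = '"' then (st.1, !st.2.1, st.2.2 ++ [c])
  else if c = ',' ∧ st.2.1 = false then (st.1 ++ [String.mk st.2.2], st.2.1, [])
  else (st.1, st.2.1, st.2.2 ++ [c])

def splitterCommaNotInQuote_alt (text : String) : List String :=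
  let st := text.toList.foldl splitBStep ([], false, [])
  st.1 ++ [String.mk st.2.2]

-- ===== PRECONDITION & SPEC =====
def Spec_splitterCommaNotInQuote (text : String) (out : List String) : Prop := out = splitterCommaNotInQuote_alt text
instance (text : String) (out : List String) : Decidable (Spec_splitterCommaNotInQuote text out) := by unfold Spec_splitterCommaNotInQuote; infer_instance

-- ===== CLAIM (what is proved, stated in full; the proofs are below) =====
def Claim_equal_splitterCommaNotInQuote : Prop := ∀ (text : String), Dom_splitterCommaNotInQuote text → Spec_splitterCommaNotInQuote text (splitterCommaNotInQuote text)

-- ===== LEMMAS AND PROOFS =====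

-- Loop invariant: at index i with last comma cut at la ≤ i, B's buffer holds exactly the slice cs[la:i].
theorem split_loop_eq (cs : List Char) :
    ∀ (m i la : Nat) (res : List String) (q : Bool), i + m = cs.length → la ≤ i →
    (let st := (PySem.List.pyRange (i : Int) (cs.length : Int) 1).foldl (splitAStep cs) (res, q, (la : Int));
     st.1 ++ [String.mk (PySem.List.slice cs (some st.2.2) none)])
    =
    (let st := (cs.drop i).foldl splitBStep (res, q, (cs.drop la).take (i - la));
     st.1 ++ [String.mk st.2.2]) := by
  intro m
  induction m with
  | zero =>
    intro i la res q hi hla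
    have hie : i = cs.length := by omega
    subst hie
    simp only [PySem.List.pyRange_one_eq_nil (le_refl _), List.foldl_nil,
      List.drop_length, PySem.List.slice_from_natCast]
    have : (cs.drop la).take (cs.length - la) = cs.drop la := by
      apply List.take_of_length_le; simp
    rw [this]
  | succ m ih =>
    intro i la res q hi hla
    have hilt : i < cs.length := by omega
    have hr : PySem.List.pyRange (i : Int) (cs.length : Int) 1
        = (i : Int) :: PySem.List.pyRange ((i : Int) + 1) (cs.length : Int) 1 :=
      PySem.List.pyRange_one_cons (by exact_mod_cast hilt)
    have hd : cs.drop i = cs[i] :: cs.drop (i + 1) := List.drop_eq_getElem_cons hilt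
    have hget : PySem.List.pyGet? cs (i : Int) = some cs[i] := by
      simp [PySem.List.pyGet?_natCast, List.getElem?_eq_getElem hilt]
    have htake : ∀ k, k ≤ i → (cs.drop k).take (i + 1 - k) = (cs.drop k).take (i - k) ++ [cs[i]] := by
      intro k hk
      have h1 : i + 1 - k = (i - k) + 1 := by omega
      have hidx : k + (i - k) = i := by omega
      rw [h1, List.take_add_one]
      have h2 : (cs.drop k)[i - k]? = some cs[i] := by
        rw [List.getElem?_drop, hidx, List.getElem?_eq_getElem hilt]
      simp [h2]
    have h1 : ((i : Int) + 1) = ((i + 1 : Nat) : Int) := by push_cast; ring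
    rw [hr, hd]
    simp only [List.foldl_cons, splitAStep, hget, splitBStep]
    by_cases hq : cs[i] = '"'
    · rw [if_pos hq, if_pos hq, h1]
      have := ih (i + 1) la res (!q) (by omega) (by omega)
      simp only at this
      rw [this, htake la hla, hq]
    · by_cases hc : cs[i] = ',' ∧ q = false
      · rw [if_neg hq, if_neg hq, if_pos hc, if_pos hc, h1]
        have := ih (i + 1) (i + 1) (res ++ [String.mk (PySem.List.slice cs (some (la : Int)) (some (i : Int)))]) q (by omega) (by omega)
        simp only at this
        rw [this]
        simp [PySem.List.slice_natCast]
      · rw [if_neg hq, if_neg hq, if_neg hc, if_neg hc, h1]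
        have := ih (i + 1) la res q (by omega) (by omega)
        simp only at this
        rw [this, htake la hla]

-- ===== VERDICT (by name: the statement is the Claim_ definition above) =====
theorem splitterCommaNotInQuote_spec : Claim_equal_splitterCommaNotInQuote := by
  intro text _
  unfold Spec_splitterCommaNotInQuote splitterCommaNotInQuote splitterCommaNotInQuote_alt
  have := split_loop_eq text.toList text.toList.length 0 0 [] false (by omega) (le_refl 0)
  simpa using this
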